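-- pv_equiv track=rewrite | github.com/PhilippOesch/twitter_stream | Streaming_Architekture/Producer/TwitterProducer.py | setup_conversation_rules_for_ids
-- ===== SOURCE A (Python) =====
-- def get_single_conversation_rule(conversation_ids: list, user: str):
--     with_prefix = ["conversation_id:" + conversation for conversation in conversation_ids]
--     return {
--         "value": " OR ".join(with_prefix),
--         "tag": user
--     }
--
-- def setup_conversation_rules_for_ids(result: list, conversation_ids: list, user: str):
--     # with_prefix = ["conversation_id:" + conversation for conversation in conversation_ids]
--     conv = []
--     for i in range(len(conversation_ids)):
--         conv.append(conversation_ids[i])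
--         if (i + 1) % 10 == 0:
--             result.append(get_single_conversation_rule(list(conv), user))
--             conv = []
--
--     if len(conv) > 0:
--         result.append(get_single_conversation_rule(list(conv), user))
--
--     return result
-- ===== SOURCE B (Python) =====
-- def get_single_conversation_rule(conversation_ids: list, user: str):
--     with_prefix = ["conversation_id:" + conversation for conversation in conversation_ids]
--     return {
--         "value": " OR ".join(with_prefix),
--         "tag": user
--     }
--
-- def setup_conversation_rules_for_ids(result: list, conversation_ids: list, user: str):
--     for i in range(0, len(conversation_ids), 10):
--         result.append(get_single_conversation_rule(conversation_ids[i:i + 10], user))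
--     return result
-- ===== Notes on version B (the rewrite author's own statement) =====
-- stated objective: simpler
-- what changed: Replaces the indexed loop with a running buffer, a (i+1)%10 counter and a trailing flush by a single stride-10 loop that appends a rule for each slice conversation_ids[i:i+10], so the final short chunk needs no special case.
import Mathlib
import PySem

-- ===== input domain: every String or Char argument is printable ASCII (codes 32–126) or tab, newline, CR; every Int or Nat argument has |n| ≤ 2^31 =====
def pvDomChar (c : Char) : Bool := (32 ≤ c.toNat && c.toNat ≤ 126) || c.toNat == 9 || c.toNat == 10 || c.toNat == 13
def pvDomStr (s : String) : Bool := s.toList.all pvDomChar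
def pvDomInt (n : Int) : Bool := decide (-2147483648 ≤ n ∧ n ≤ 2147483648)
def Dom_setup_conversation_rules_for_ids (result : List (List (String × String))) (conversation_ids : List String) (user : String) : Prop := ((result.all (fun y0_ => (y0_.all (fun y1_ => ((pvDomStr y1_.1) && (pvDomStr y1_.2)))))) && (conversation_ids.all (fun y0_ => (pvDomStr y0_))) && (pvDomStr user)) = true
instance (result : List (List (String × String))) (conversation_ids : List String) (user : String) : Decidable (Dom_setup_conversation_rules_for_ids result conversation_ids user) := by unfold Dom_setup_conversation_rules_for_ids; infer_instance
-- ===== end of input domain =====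

-- B replaces A's buffer-and-counter loop (with its trailing flush) by a single stride-10 loop that
-- slices each chunk directly; both Pythons append to the caller's `result` list in place — the
-- theorems below are about the return value.

-- ===== PORT A =====
-- shared helper, unchanged in B: get_single_conversation_rule
def get_single_conversation_rule (conversation_ids : List String) (user : String) : List (String × String) :=
  let with_prefix := conversation_ids.map (fun conversation => "conversation_id:" ++ conversation)
  [("value", PySem.Str.join " OR " with_prefix), ("tag", user)]

-- the `for i in range(len(conversation_ids))` loop; i is the running index (always in range, so we
-- walk the list with the counter), state = (result, conv)
def convLoopA (ids : List String) (i : Nat) (result : List (List (String × String))) (conv : List String) (user : String) : List (List (String × String)) × List String :=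
  match ids with
  | [] => (result, conv)
  | x :: xs =>
    let conv' := conv ++ [x]
    if (i + 1) % 10 == 0 then
      convLoopA xs (i + 1) (result ++ [get_single_conversation_rule conv' user]) [] user
    else
      convLoopA xs (i + 1) result conv' user

def setup_conversation_rules_for_ids (result : List (List (String × String))) (conversation_ids : List String) (user : String) : List (List (String × String)) :=
  let rc := convLoopA conversation_ids 0 result [] user
  if rc.2.length > 0 then rc.1 ++ [get_single_conversation_rule rc.2 user] else rc.1

-- ===== PORT B =====
-- `for i in range(0, len(conversation_ids), 10): result.append(rule(conversation_ids[i:i+10]))`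
def setup_conversation_rules_for_ids_alt (result : List (List (String × String))) (conversation_ids : List String) (user : String) : List (List (String × String)) :=
  (PySem.List.pyRange 0 conversation_ids.length 10).foldl
    (fun acc i => acc ++ [get_single_conversation_rule (PySem.List.slice conversation_ids (some i) (some (i + 10))) user])
    result

-- ===== PRECONDITION & SPEC =====
def Spec_setup_conversation_rules_for_ids (result : List (List (String × String))) (conversation_ids : List String) (user : String) (out : List (List (String × String))) : Prop := out = setup_conversation_rules_for_ids_alt result conversation_ids user
instance (result : List (List (String × String))) (conversation_ids : List String) (user : String) (out : List (List (String × String))) : Decidable (Spec_setup_conversation_rules_for_ids result conversation_ids user out) := by unfold Spec_setup_conversation_rules_for_ids; infer_instance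

-- ===== CLAIM (what is proved, stated in full; the proofs are below) =====
def Claim_equal_setup_conversation_rules_for_ids : Prop := ∀ (result : List (List (String × String))) (conversation_ids : List String) (user : String), Dom_setup_conversation_rules_for_ids result conversation_ids user → Spec_setup_conversation_rules_for_ids result conversation_ids user (setup_conversation_rules_for_ids result conversation_ids user)

-- ===== LEMMAS AND PROOFS =====

-- the trailing `if len(conv) > 0` flush of A, as a named helper for the proofs
def flushA (rc : List (List (String × String)) × List String) (user : String) : List (List (String × String)) :=
  if rc.2.length > 0 then rc.1 ++ [get_single_conversation_rule rc.2 user] else rc.1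

lemma A_eq_flush (result : List (List (String × String))) (ids : List String) (user : String) :
    setup_conversation_rules_for_ids result ids user = flushA (convLoopA ids 0 result [] user) user := rfl

-- proof-only middle form: chunk the list ten at a time by take/drop
def chunkRec (result : List (List (String × String))) (ids : List String) (user : String) : List (List (String × String)) :=
  match ids with
  | [] => result
  | x :: xs => chunkRec (result ++ [get_single_conversation_rule ((x :: xs).take 10) user]) ((x :: xs).drop 10) user
termination_by ids.length
decreasing_by simp

lemma chunkRec_nil (result : List (List (String × String))) (user : String) :
    chunkRec result [] user = result := by
  rw [chunkRec.eq_def]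

lemma chunkRec_cons' (result : List (List (String × String))) (x : String) (xs : List String) (user : String) :
    chunkRec result (x :: xs) user =
      chunkRec (result ++ [get_single_conversation_rule ((x :: xs).take 10) user]) ((x :: xs).drop 10) user := by
  rw [chunkRec.eq_def]

lemma pyRange_ten_nil (a b : Int) (h : b ≤ a) : PySem.List.pyRange a b 10 = [] := by
  rw [PySem.List.pyRange_of_pos _ _ (by norm_num : (0:Int) < 10), if_neg (by omega)]
  simp

lemma pyRange_ten_cons (a b : Int) (h : a < b) :
    PySem.List.pyRange a b 10 = a :: PySem.List.pyRange (a + 10) b 10 := by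
  rw [PySem.List.pyRange_of_pos _ _ (by norm_num : (0:Int) < 10),
      PySem.List.pyRange_of_pos _ _ (by norm_num : (0:Int) < 10), if_pos h]
  by_cases h' : a + 10 < b
  · rw [if_pos h']
    have hn : ((b - a + 10 - 1) / 10).toNat = ((b - (a + 10) + 10 - 1) / 10).toNat + 1 := by
      omega
    rw [hn, List.range_succ_eq_map]
    simp only [List.map_cons, List.map_map]
    congr 1
    · norm_num
    · apply List.map_congr_left
      intro k _
      simp only [Function.comp_apply]
      push_cast
      ring
  · rw [if_neg h']
    have hn : ((b - a + 10 - 1) / 10).toNat = 1 := by omega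
    rw [hn]
    simp

-- B's stride fold over `pre ++ ids`, started at index |pre|, chunks `ids`
lemma fold_eq_chunk : ∀ (n : Nat) (ids : List String), ids.length = n →
    ∀ (pre : List String) (result : List (List (String × String))) (user : String),
    (PySem.List.pyRange pre.length (pre.length + ids.length) 10).foldl
      (fun acc i => acc ++ [get_single_conversation_rule (PySem.List.slice (pre ++ ids) (some i) (some (i + 10))) user])
      result = chunkRec result ids user := by
  intro n
  induction n using Nat.strong_induction_on with
  | _ n ih =>
    intro ids hlen pre result user
    cases ids with
    | nil => rw [pyRange_ten_nil _ _ (by simp), chunkRec_nil]; rfl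
    | cons x xs =>
      rw [pyRange_ten_cons _ _ (by push_cast [List.length_cons]; omega), List.foldl_cons]
      have hsl : PySem.List.slice (pre ++ x :: xs) (some (pre.length : Int)) (some ((pre.length : Int) + 10)) = (x :: xs).take 10 := by
        have := PySem.List.slice_natCast_add (pre ++ x :: xs) pre.length 10
        push_cast at this ⊢
        rw [this, List.drop_left]
      rw [hsl, chunkRec_cons']
      have hsplit : pre ++ x :: xs = (pre ++ (x :: xs).take 10) ++ (x :: xs).drop 10 := by
        rw [List.append_assoc, List.take_append_drop]
      have hlenpre : ((pre ++ (x :: xs).take 10).length : Int) = (pre.length : Int) + 10 ∨ ((x :: xs).drop 10 = [] ∧ (pre.length : Int) + (x :: xs).length ≤ (pre.length : Int) + 10) := by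
        by_cases hbig : 10 ≤ (x :: xs).length
        · left; simp at hbig ⊢; omega
        · right
          constructor
          · exact List.drop_eq_nil_of_le (by omega)
          · omega
      rcases hlenpre with hpre | ⟨hnil, hle⟩
      · have := ih ((x :: xs).drop 10).length (by subst hlen; simp) ((x :: xs).drop 10) rfl (pre ++ (x :: xs).take 10)
          (result ++ [get_single_conversation_rule ((x :: xs).take 10) user]) user
        rw [← hsplit] at this
        rw [← this, hpre]
        have h10 : 10 ≤ (x :: xs).length := by
          push_cast at hpre; simp [List.length_take] at hpre ⊢; omega
        have hlen2 : ((pre.length : Int) + 10) + (((x :: xs).drop 10).length : Int) = (pre.length : Int) + ((x :: xs).length : Int) := by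
          simp [List.length_drop]; simp at h10; omega
        push_cast at hlen2 ⊢
        rw [hlen2]
      · rw [hnil, chunkRec_nil, pyRange_ten_nil _ _ (by omega)]
        rfl

-- invariant: while running A's loop with buffer `conv` at index `i` (i % 10 = |conv| < 10), the loop
-- followed by the trailing flush produces exactly the ten-at-a-time chunking of `conv ++ ids`
lemma loopA_eq_chunk (ids : List String) : ∀ (conv : List String) (i : Nat)
    (result : List (List (String × String))) (user : String),
    conv.length < 10 → i % 10 = conv.length →
    flushA (convLoopA ids i result conv user) user = chunkRec result (conv ++ ids) user := by
  induction ids with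
  | nil =>
    intro conv i result user hlt hmod
    cases conv with
    | nil => simp [convLoopA, flushA, chunkRec_nil]
    | cons c cs =>
      simp only [convLoopA, flushA, List.append_nil]
      rw [if_pos (by simp), chunkRec_cons']
      have h10 : (c :: cs).drop 10 = [] := List.drop_eq_nil_of_le (by simpa using Nat.le_of_lt hlt)
      have ht : (c :: cs).take 10 = c :: cs := List.take_of_length_le (by simpa using Nat.le_of_lt hlt)
      rw [h10, ht, chunkRec_nil]
  | cons x xs ih =>
    intro conv i result user hlt hmod
    by_cases h : (i + 1) % 10 = 0
    · have h9 : conv.length = 9 := by omega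
      simp only [convLoopA, show ((i + 1) % 10 == 0) = true by simpa using h, if_true]
      rw [ih [] (i + 1) _ user (by norm_num) (by simp [h])]
      have hsplit : conv ++ x :: xs = (conv ++ [x]) ++ xs := by simp
      rw [hsplit]
      cases hcx : conv ++ [x] with
      | nil => simp at hcx
      | cons y ys =>
        have hlen : (y :: ys).length = 10 := by rw [← hcx]; simp [h9]
        have ht : List.take 10 ((y :: ys) ++ xs) = y :: ys := by
          rw [List.take_append_of_le_length (by omega), List.take_of_length_le (by omega)]
        have hd : List.drop 10 ((y :: ys) ++ xs) = xs := by
          rw [List.drop_append_of_le_length (by omega), List.drop_eq_nil_of_le (by omega)]; simp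
        rw [List.cons_append, chunkRec_cons', ← List.cons_append, ht, hd]
        simp
    · simp only [convLoopA, show ((i + 1) % 10 == 0) = false by simpa using h,
        Bool.false_eq_true, if_false]
      rw [ih (conv ++ [x]) (i + 1) result user (by simp; omega) (by simp; omega)]
      simp

-- ===== VERDICT (by name: the statement is the Claim_ definition above) =====
theorem setup_conversation_rules_for_ids_spec : Claim_equal_setup_conversation_rules_for_ids := by
  intro result conversation_ids user _
  unfold Spec_setup_conversation_rules_for_ids setup_conversation_rules_for_ids_alt
  rw [A_eq_flush]
  have hfold := fold_eq_chunk conversation_ids.length conversation_ids rfl [] result user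
  simp only [List.nil_append, List.length_nil, Nat.cast_zero, zero_add] at hfold
  rw [hfold]
  simpa using loopA_eq_chunk conversation_ids [] 0 result user (by norm_num) (by norm_num)
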